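-- pv_equiv track=rewrite | github.com/tom832/SUPERChem_eval | analysis/generate_pdf.py | _parse_bracket_content
-- ===== SOURCE A (Python) =====
-- from typing import Dict, List, Tuple, Optional
--
-- def _parse_bracket_content(content: str) -> Tuple[Optional[str], Optional[str]]:
--     """
--     反向解析括号内容
--     从末尾找最后一组 (...) 作为第二部分
--     剩余 [...] 作为第一部分
--
--     返回: (方括号内容, 小括号内容) 或 (None, None)
--     """
--     content = content.strip()
--
--     # 步骤1: 从末尾找 )
--     if not content.endswith(')'):
--         return None, None
--
--     # 步骤2: 反向匹配找到对应的 (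
--     depth = 0
--     paren_start = -1
--     for i in range(len(content) - 1, -1, -1):
--         if content[i] == ')':
--             depth += 1
--         elif content[i] == '(':
--             depth -= 1
--             if depth == 0:
--                 paren_start = i
--                 break
--
--     if paren_start == -1:
--         return None, None
--
--     # 步骤3: 提取小括号内容
--     paren_content = content[paren_start + 1 : -1]  # 去掉 ( 和 )
--
--     # 步骤4: 剩余部分
--     remaining = content[:paren_start].strip()
--
--     # 步骤5: 去除 [ ] 或 ![ ]
--     if remaining.startswith('!['):
--         remaining = remaining[2:]
--     elif remaining.startswith('['):
--         remaining = remaining[1:]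
--
--     if remaining.endswith(']'):
--         remaining = remaining[:-1]
--
--     return remaining.strip(), paren_content.strip()
-- ===== SOURCE B (Python) =====
-- def _parse_bracket_content(content):
--     # Forward one-pass: the '(' matching the final ')' is the last '(' whose
--     # prefix balance equals the whole string's net balance.  The bracket
--     # trimming is done arithmetically: compute start/stop offsets once and
--     # take a single slice.
--     content = content.strip()
--     if not content.endswith(')'):
--         return None, None
--
--     total = content.count('(') - content.count(')')
--     bal = 0
--     paren_start = -1
--     for i, ch in enumerate(content):
--         if ch == '(':
--             if bal == total:
--                 paren_start = i
--             bal += 1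
--         elif ch == ')':
--             bal -= 1
--
--     if paren_start == -1:
--         return None, None
--
--     paren = content[paren_start + 1 : len(content) - 1].strip()
--     left = content[:paren_start].strip()
--     lo = 2 if left.startswith('![') else (1 if left.startswith('[') else 0)
--     hi = len(left) - 1 if left.endswith(']') else len(left)
--     return left[lo:hi].strip(), paren
-- ===== Notes on version B (the rewrite author's own statement) =====
-- stated objective: alternative
-- what changed: A's backward depth-counter scan is replaced by a single forward pass that finds the last '(' whose prefix balance equals the string's net balance, and A's staged conditional slicing for the bracket trimming is replaced by arithmetic start/stop offsets with one slice.
import Mathlib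
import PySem

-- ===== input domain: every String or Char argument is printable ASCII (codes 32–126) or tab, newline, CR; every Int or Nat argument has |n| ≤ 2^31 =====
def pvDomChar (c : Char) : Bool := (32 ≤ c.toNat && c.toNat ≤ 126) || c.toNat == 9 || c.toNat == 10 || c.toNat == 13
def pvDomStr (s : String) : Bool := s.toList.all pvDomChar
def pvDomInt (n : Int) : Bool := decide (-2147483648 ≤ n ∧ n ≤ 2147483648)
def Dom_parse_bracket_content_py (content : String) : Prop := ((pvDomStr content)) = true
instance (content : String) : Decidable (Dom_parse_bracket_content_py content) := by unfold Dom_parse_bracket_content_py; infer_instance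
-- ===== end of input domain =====

-- B replaces A's backward depth-counter scan by a forward pass that finds the last '(' whose
-- prefix balance equals the string's net balance, and replaces A's staged conditional slicing
-- for the bracket trimming by arithmetic start/stop offsets and ONE slice (objective: alternative).

-- ===== PORT A =====
-- A's reverse loop: for i in range(len(content)-1, -1, -1), depth counter, break on match
def pvALoop (cs : List Char) (idxs : List Int) (depth : Int) : Int :=
  match idxs with
  | [] => -1
  | i :: rest =>
    match PySem.List.pyGet? cs i with
    | none => -1   -- unreachable: every index produced by the range is valid
    | some c =>
      if c = ')' then pvALoop cs rest (depth + 1)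
      else if c = '(' then
        if depth - 1 = 0 then i else pvALoop cs rest (depth - 1)
      else pvALoop cs rest depth

-- A's steps 3–5: slice out the (...) body, then conditionally re-slice the leading part
def pvAFinish (cs : List Char) (paren_start : Int) : Option String × Option String :=
  if paren_start = -1 then (none, none)
  else
    let paren_content := PySem.List.slice cs (some (paren_start + 1)) (some (-1))
    let remaining0 := PySem.Chars.strip (PySem.List.slice cs none (some paren_start))
    let remaining1 :=
      if PySem.Chars.startswith remaining0 ['!', '['] then PySem.List.slice remaining0 (some 2) none
      else if PySem.Chars.startswith remaining0 ['['] then PySem.List.slice remaining0 (some 1) none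
      else remaining0
    let remaining2 :=
      if PySem.Chars.endswith remaining1 [']'] then PySem.List.slice remaining1 none (some (-1))
      else remaining1
    (some (String.ofList (PySem.Chars.strip remaining2)), some (String.ofList (PySem.Chars.strip paren_content)))

def pvAMain (cs : List Char) : Option String × Option String :=
  if PySem.Chars.endswith cs [')'] then
    pvAFinish cs (pvALoop cs (PySem.List.pyRange ((cs.length : Int) - 1) (-1) (-1)) 0)
  else (none, none)

def parse_bracket_content_py (content : String) : Option String × Option String :=
  pvAMain (PySem.Chars.strip content.toList)

-- ===== PORT B =====
-- B's forward loop: for i, ch in enumerate(content): record i at '(' when bal == total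
def pvBLoop (l : List Char) (total : Int) (i : Int) (bal : Int) (ps : Int) : Int :=
  match l with
  | [] => ps
  | c :: rest =>
    if c = '(' then pvBLoop rest total (i + 1) (bal + 1) (if bal = total then i else ps)
    else if c = ')' then pvBLoop rest total (i + 1) (bal - 1) ps
    else pvBLoop rest total (i + 1) bal ps

-- B's tail: offsets lo/hi computed up front, a single slice of the stripped left part
def pvBFinish (cs : List Char) (paren_start : Int) : Option String × Option String :=
  if paren_start = -1 then (none, none)
  else
    let paren := PySem.Chars.strip (PySem.List.slice cs (some (paren_start + 1)) (some ((cs.length : Int) - 1)))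
    let left := PySem.Chars.strip (PySem.List.slice cs none (some paren_start))
    let lo : Int := if PySem.Chars.startswith left ['!', '['] then 2
                    else if PySem.Chars.startswith left ['['] then 1 else 0
    let hi : Int := if PySem.Chars.endswith left [']'] then (left.length : Int) - 1 else (left.length : Int)
    (some (String.ofList (PySem.Chars.strip (PySem.List.slice left (some lo) (some hi)))), some (String.ofList paren))

def pvBMain (cs : List Char) : Option String × Option String :=
  if PySem.Chars.endswith cs [')'] then
    pvBFinish cs (pvBLoop cs ((PySem.Chars.count cs ['('] : Int) - (PySem.Chars.count cs [')'] : Int)) 0 0 (-1))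
  else (none, none)

def parse_bracket_content_py_alt (content : String) : Option String × Option String :=
  pvBMain (PySem.Chars.strip content.toList)

-- ===== PRECONDITION & SPEC =====
def Spec_parse_bracket_content_py (content : String) (out : Option String × Option String) : Prop := out = parse_bracket_content_py_alt content
instance (content : String) (out : Option String × Option String) : Decidable (Spec_parse_bracket_content_py content out) := by unfold Spec_parse_bracket_content_py; infer_instance

-- ===== CLAIM (what is proved, stated in full; the proofs are below) =====
def Claim_equal_parse_bracket_content_py : Prop := ∀ (content : String), Dom_parse_bracket_content_py content → Spec_parse_bracket_content_py content (parse_bracket_content_py content)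

-- ===== LEMMAS AND PROOFS =====

-- net parenthesis balance of a list of characters
def pvBal (l : List Char) : Int := (l.count '(' : Int) - (l.count ')' : Int)

-- common specification of both loops: greatest i < k with cs[i] = '(' and balanced suffix, else -1
def pvG (cs : List Char) : Nat → Int
  | 0 => -1
  | k + 1 => if cs[k]? = some '(' ∧ pvBal (cs.drop k) = 0 then (k : Int) else pvG cs k

theorem pvBal_append (a b : List Char) : pvBal (a ++ b) = pvBal a + pvBal b := by
  simp [pvBal, List.count_append]; ring

theorem pvBal_cons (c : Char) (t : List Char) :
    pvBal (c :: t) = (if c = '(' then 1 else if c = ')' then -1 else 0) + pvBal t := by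
  simp only [pvBal, List.count_cons]
  split_ifs with h1 h2 <;> simp_all <;> ring

theorem pvCount_go_single (c : Char) :
    ∀ (l : List Char) (fuel acc : Nat), l.length ≤ fuel →
      PySem.Chars.count.go [c] fuel l acc = acc + l.count c := by
  intro l
  induction l with
  | nil => intro fuel acc _; cases fuel <;> simp [PySem.Chars.count.go]
  | cons h t ih =>
    intro fuel acc hf
    cases fuel with
    | zero => simp at hf
    | succ m =>
      have hm : t.length ≤ m := by simp at hf; omega
      by_cases hc : h = c
      · subst hc
        simp only [PySem.Chars.count.go, List.isPrefixOf, beq_self_eq_true, Bool.and_self,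
          if_true, List.length_cons, List.length_nil, List.drop_succ_cons, List.drop_zero]
        rw [ih m (acc + 1) hm]
        simp
        omega
      · have hp : [c].isPrefixOf (h :: t) = false := by
          simp [List.isPrefixOf]
          exact fun hh => hc hh.symm
        simp only [PySem.Chars.count.go, hp, Bool.false_eq_true, if_false]
        rw [ih m acc hm]
        simp [List.count_cons]
        omega

theorem pvCount_single (l : List Char) (c : Char) : PySem.Chars.count l [c] = l.count c := by
  simp only [PySem.Chars.count, List.isEmpty_cons, Bool.false_eq_true, if_false]
  simpa using pvCount_go_single c l l.length 0 (le_refl _)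

-- A's backward loop computes pvG
theorem pvALoop_eq (cs : List Char) :
    ∀ k, k ≤ cs.length →
      pvALoop cs (PySem.List.pyRange ((k : Int) - 1) (-1) (-1)) (-(pvBal (cs.drop k))) = pvG cs k := by
  intro k
  induction k with
  | zero =>
    intro _
    rw [PySem.List.pyRange_neg_one_eq_nil (by norm_num)]
    simp [pvALoop, pvG]
  | succ k ih =>
    intro hk
    have hklt : k < cs.length := by omega
    have hk' : k ≤ cs.length := by omega
    have hstep : ((k + 1 : Nat) : Int) - 1 = (k : Int) := by push_cast; ring
    rw [hstep, PySem.List.pyRange_neg_one_cons (by omega)]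
    have hget : PySem.List.pyGet? cs (k : Int) = some cs[k] := by
      rw [PySem.List.pyGet?_natCast]; exact List.getElem?_eq_getElem hklt
    have hdrop : cs.drop k = cs[k] :: cs.drop (k + 1) := List.drop_eq_getElem_cons hklt
    have hbal := pvBal_cons cs[k] (cs.drop (k + 1))
    rw [← hdrop] at hbal
    simp only [pvALoop, hget]
    simp only [pvG, List.getElem?_eq_getElem hklt]
    by_cases h1 : cs[k] = ')'
    · rw [if_pos h1]
      have hbal' : pvBal (cs.drop k) = -1 + pvBal (cs.drop (k + 1)) := by
        rw [hbal, h1]; simp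
      have e1 : -(pvBal (cs.drop (k + 1))) + 1 = -(pvBal (cs.drop k)) := by omega
      rw [e1, ih hk']
      simp [h1]
    · by_cases h2 : cs[k] = '('
      · rw [if_neg h1, if_pos h2]
        have hbal' : pvBal (cs.drop k) = 1 + pvBal (cs.drop (k + 1)) := by
          rw [hbal, h2]; simp
        by_cases h0 : pvBal (cs.drop k) = 0
        · rw [if_pos (by omega : -(pvBal (cs.drop (k + 1))) - 1 = 0)]
          simp [h2, h0]
        · rw [if_neg (by omega : ¬ -(pvBal (cs.drop (k + 1))) - 1 = 0)]
          have e1 : -(pvBal (cs.drop (k + 1))) - 1 = -(pvBal (cs.drop k)) := by omega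
          rw [e1, ih hk']
          simp [h0]
      · rw [if_neg h1, if_neg h2]
        have hbal' : pvBal (cs.drop k) = pvBal (cs.drop (k + 1)) := by
          rw [hbal]; simp [h1, h2]
        have e1 : -(pvBal (cs.drop (k + 1))) = -(pvBal (cs.drop k)) := by omega
        rw [e1, ih hk']
        simp [h2]

-- B's forward loop computes pvG
theorem pvBLoop_eq (cs : List Char) :
    ∀ m k, k + m = cs.length →
      pvBLoop (cs.drop k) (pvBal cs) (k : Int) (pvBal (cs.take k)) (pvG cs k) = pvG cs cs.length := by
  intro m
  induction m with
  | zero =>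
    intro k hk
    rw [show k = cs.length by omega]
    simp [pvBLoop]
  | succ m ih =>
    intro k hk
    have hklt : k < cs.length := by omega
    have hdrop : cs.drop k = cs[k] :: cs.drop (k + 1) := List.drop_eq_getElem_cons hklt
    have htake : cs.take (k + 1) = cs.take k ++ [cs[k]] := by
      rw [List.take_add_one, List.getElem?_eq_getElem hklt]; rfl
    have hTD : pvBal cs = pvBal (cs.take k) + pvBal (cs.drop k) := by
      conv_lhs => rw [← List.take_append_drop k cs]
      exact pvBal_append _ _
    have hone : pvBal (cs.take (k + 1)) =
        pvBal (cs.take k) + (if cs[k] = '(' then 1 else if cs[k] = ')' then -1 else 0) := by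
      rw [htake, pvBal_append, pvBal_cons]
      simp [pvBal]
    have hcast : (k : Int) + 1 = ((k + 1 : Nat) : Int) := by push_cast; ring
    rw [hdrop]
    simp only [pvBLoop]
    by_cases h2 : cs[k] = '('
    · rw [if_pos h2]
      have hone' : pvBal (cs.take (k + 1)) = pvBal (cs.take k) + 1 := by
        rw [hone, h2]; simp
      have hps : (if pvBal (cs.take k) = pvBal cs then (k : Int) else pvG cs k) = pvG cs (k + 1) := by
        simp only [pvG, List.getElem?_eq_getElem hklt, h2]
        by_cases h0 : pvBal (cs.drop k) = 0
        · rw [if_pos (by omega), if_pos (by simp [h0])]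
        · rw [if_neg (by omega), if_neg (by simp [h0])]
      rw [hps, hcast, show pvBal (cs.take k) + 1 = pvBal (cs.take (k + 1)) by omega]
      exact ih (k + 1) (by omega)
    · by_cases h1 : cs[k] = ')'
      · rw [if_neg h2, if_pos h1]
        have hone' : pvBal (cs.take (k + 1)) = pvBal (cs.take k) - 1 := by
          rw [hone, h1]; simp; omega
        have hg : pvG cs k = pvG cs (k + 1) := by
          simp [pvG, List.getElem?_eq_getElem hklt, h1]
        rw [hg, hcast, show pvBal (cs.take k) - 1 = pvBal (cs.take (k + 1)) by omega]
        exact ih (k + 1) (by omega)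
      · rw [if_neg h2, if_neg h1]
        have hone' : pvBal (cs.take (k + 1)) = pvBal (cs.take k) := by
          rw [hone]; simp [h1, h2]
        have hg : pvG cs k = pvG cs (k + 1) := by
          simp [pvG, List.getElem?_eq_getElem hklt, h2]
        rw [hg, hcast, show pvBal (cs.take k) = pvBal (cs.take (k + 1)) by omega]
        exact ih (k + 1) (by omega)

-- A's paren slice cs[ps+1:-1] equals B's cs[ps+1:len(cs)-1]
theorem pvParenSlice_eq (cs : List Char) (a : Int) :
    PySem.List.slice cs (some a) (some ((cs.length : Int) - 1)) =
    PySem.List.slice cs (some a) (some (-1)) := by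
  have h : PySem.List.clampIdx cs.length ((cs.length : Int) - 1) = cs.length - 1 := by
    cases hn : cs.length with
    | zero =>
      rw [show ((0 : Nat) : Int) - 1 = -1 by ring, PySem.List.clampIdx_neg_one]
    | succ n =>
      have h1 : ((n + 1 : Nat) : Int) - 1 = (n : Int) := by push_cast; ring
      rw [h1, PySem.List.clampIdx_natCast]
      omega
  simp [PySem.List.slice, h]

-- prepending a char other than ']' does not change whether a list ends with ']'
theorem pvEnds_cons (y : Char) (t : List Char) (hy : y ≠ ']') :
    PySem.Chars.endswith (y :: t) [']'] = PySem.Chars.endswith t [']'] := by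
  rw [Bool.eq_iff_iff, PySem.Chars.endswith_iff, PySem.Chars.endswith_iff, List.suffix_cons_iff]
  constructor
  · rintro (h | h)
    · injection h with h1 _; exact absurd h1.symm hy
    · exact h
  · exact Or.inr

-- A's staged conditional slicing equals B's single slice with computed offsets
theorem pvStaged_eq_slice (L : List Char) :
    (if PySem.Chars.endswith
        (if PySem.Chars.startswith L ['!', '['] then PySem.List.slice L (some 2) none
         else if PySem.Chars.startswith L ['['] then PySem.List.slice L (some 1) none
         else L) [']'] then
       PySem.List.slice
        (if PySem.Chars.startswith L ['!', '['] then PySem.List.slice L (some 2) none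
         else if PySem.Chars.startswith L ['['] then PySem.List.slice L (some 1) none
         else L) none (some (-1))
     else
       (if PySem.Chars.startswith L ['!', '['] then PySem.List.slice L (some 2) none
        else if PySem.Chars.startswith L ['['] then PySem.List.slice L (some 1) none
        else L)) =
    PySem.List.slice L
      (some (if PySem.Chars.startswith L ['!', '['] then 2
             else if PySem.Chars.startswith L ['['] then 1 else 0))
      (some (if PySem.Chars.endswith L [']'] then (L.length : Int) - 1 else (L.length : Int))) := by
  by_cases hb : PySem.Chars.startswith L ['!', '['] = true
  · obtain ⟨t, rfl⟩ := (PySem.Chars.startswith_iff _ _).mp hb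
    simp only [hb, if_true]
    have hd2 : PySem.List.slice (['!', '['] ++ t) (some 2) none = t := by
      simp [PySem.List.slice_from]
    rw [hd2]
    rw [show PySem.Chars.endswith (['!', '['] ++ t) [']'] = PySem.Chars.endswith t [']'] by
      rw [List.cons_append, List.singleton_append, pvEnds_cons '!' _ (by decide),
        pvEnds_cons '[' _ (by decide)]]
    have hlen : (((['!', '['] ++ t : List Char)).length : Int) = (t.length : Int) + 2 := by
      simp; ring
    by_cases he : PySem.Chars.endswith t [']'] = true
    · simp only [he, if_true]
      rw [PySem.List.slice_to_neg_one]
      rw [PySem.List.slice_toNat _ (by norm_num) (by rw [hlen]; omega), hlen]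
      have h1 : (['!', '['] ++ t : List Char).drop (2 : Int).toNat = t := rfl
      have h2 : ((t.length : Int) + 2 - 1).toNat - (2 : Int).toNat = t.length - 1 := by omega
      rw [h1, h2, List.dropLast_eq_take]
    · simp only [he, Bool.false_eq_true, if_false]
      rw [PySem.List.slice_toNat _ (by norm_num) (by rw [hlen]; omega), hlen]
      have h1 : (['!', '['] ++ t : List Char).drop (2 : Int).toNat = t := rfl
      have h2 : ((t.length : Int) + 2).toNat - (2 : Int).toNat = t.length := by omega
      rw [h1, h2, List.take_length]
  · by_cases hs : PySem.Chars.startswith L ['['] = true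
    · obtain ⟨t, rfl⟩ := (PySem.Chars.startswith_iff _ _).mp hs
      simp only [hb, hs, Bool.false_eq_true, if_false, if_true]
      have hd1 : PySem.List.slice (['['] ++ t) (some 1) none = t := by
        simp [PySem.List.slice_from]
      rw [hd1]
      rw [show PySem.Chars.endswith (['['] ++ t) [']'] = PySem.Chars.endswith t [']'] by
        rw [List.singleton_append, pvEnds_cons '[' _ (by decide)]]
      have hlen : (((['['] ++ t : List Char)).length : Int) = (t.length : Int) + 1 := by simp
      by_cases he : PySem.Chars.endswith t [']'] = true
      · simp only [he, if_true]
        rw [PySem.List.slice_to_neg_one]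
        rw [PySem.List.slice_toNat _ (by norm_num) (by rw [hlen]; omega), hlen]
        have h1 : (['['] ++ t : List Char).drop (1 : Int).toNat = t := rfl
        have h2 : ((t.length : Int) + 1 - 1).toNat - (1 : Int).toNat = t.length - 1 := by omega
        rw [h1, h2, List.dropLast_eq_take]
      · simp only [he, Bool.false_eq_true, if_false]
        rw [PySem.List.slice_toNat _ (by norm_num) (by rw [hlen]; omega), hlen]
        have h1 : (['['] ++ t : List Char).drop (1 : Int).toNat = t := rfl
        have h2 : ((t.length : Int) + 1).toNat - (1 : Int).toNat = t.length := by omega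
        rw [h1, h2, List.take_length]
    · simp only [hb, hs, Bool.false_eq_true, if_false]
      rw [PySem.List.slice_zero_start]
      by_cases he : PySem.Chars.endswith L [']'] = true
      · have hne : L ≠ [] := by rintro rfl; revert he; decide
        have hpos : 0 < L.length := List.length_pos_iff.mpr hne
        simp only [he, if_true]
        rw [PySem.List.slice_to_neg_one, PySem.List.slice_to _ (by omega)]
        have h2 : ((L.length : Int) - 1).toNat = L.length - 1 := by omega
        rw [h2, List.dropLast_eq_take]
      · simp only [he, Bool.false_eq_true, if_false]
        rw [PySem.List.slice_to _ (by omega)]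
        have h2 : ((L.length : Int)).toNat = L.length := by omega
        rw [h2, List.take_length]

theorem pvFinish_eq (cs : List Char) (ps : Int) : pvAFinish cs ps = pvBFinish cs ps := by
  unfold pvAFinish pvBFinish
  by_cases h : ps = -1
  · simp [h]
  · simp only [h, if_false, pvParenSlice_eq, pvStaged_eq_slice]

theorem pvMain_eq (cs : List Char) : pvAMain cs = pvBMain cs := by
  unfold pvAMain pvBMain
  by_cases h : PySem.Chars.endswith cs [')'] = true
  · simp only [h, if_true]
    rw [pvFinish_eq]
    congr 1
    have hA := pvALoop_eq cs cs.length (le_refl _)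
    have hB := pvBLoop_eq cs cs.length 0 (by omega)
    simp only [List.drop_length, List.take_zero] at hA hB
    have hbal0 : pvBal ([] : List Char) = 0 := by simp [pvBal]
    rw [hbal0] at hA hB
    simp only [neg_zero] at hA
    rw [hA]
    rw [pvCount_single, pvCount_single]
    have : (cs.count '(' : Int) - (cs.count ')' : Int) = pvBal cs := rfl
    rw [this]
    have : pvG cs 0 = -1 := rfl
    rw [← this]
    simpa using hB.symm
  · simp [h]

-- ===== VERDICT (by name: the statement is the Claim_ definition above) =====
theorem parse_bracket_content_py_spec : Claim_equal_parse_bracket_content_py := by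
  intro content _
  unfold Spec_parse_bracket_content_py parse_bracket_content_py parse_bracket_content_py_alt
  exact pvMain_eq _
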